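-- pv_equiv track=rewrite | github.com/texttechnologylab/duui-uima-reader | duui-dt_neg-reader/src/dtneg_reader_utils/dtneg_reader.py | get_delimiter_offsets
-- ===== SOURCE A (Python) =====
-- def get_delimiter_offsets(s):
--     # Define delimiter pairs: (opening, closing, type)
--     delimiter_pairs = [('<<', '>>', '<<>>'), ('{', '}', '{}'), ('[', ']', '[]')]
--
--     # Maps for quick lookup
--     opening_to_type = {open: type for open, close, type in delimiter_pairs}
--     closing_to_type = {close: type for open, close, type in delimiter_pairs}
--
--     # Stack to track nested delimiters
--     stack = []
--     # Final string without delimiters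
--     final_string = ""
--     # List to store delimiter sets for each character in final_string
--     char_delimiters = []
--
--     # Parse the string
--     i = 0
--     while i < len(s):
--         found = False
--         # Check each delimiter pair
--         for open, close, type in delimiter_pairs:
--             # Opening delimiter
--             if s[i:i + len(open)] == open:
--                 stack.append(type)
--                 i += len(open)
--                 found = True
--                 break
--             # Closing delimiter
--             elif s[i:i + len(close)] == close:
--                 if not stack or stack[-1] != type:
--                     raise ValueError("Mismatched delimiters", s)
--                 stack.pop()
--                 i += len(close)
--                 found = True
--                 break
--         # Character is not part of a delimiter
--         if not found:
--             final_string += s[i]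
--             # Record current delimiters for this character
--             char_delimiters.append(set(stack))
--             i += 1
--
--     # Find offsets for each delimiter type
--     from collections import defaultdict
--     offsets = defaultdict(list)
--     delimiter_types = [pair[2] for pair in delimiter_pairs]
--
--     for type in delimiter_types:
--         in_range = False
--         start = 0
--         for j in range(len(final_string)):
--             if type in char_delimiters[j]:
--                 if not in_range:
--                     in_range = True
--                     start = j
--             elif in_range:
--                 offsets[type].append((start, j))
--                 in_range = False
--         if in_range:
--             offsets[type].append((start, len(final_string)))
--
--     # Format result as list of (delimiter_type, content, (start, end))
--     result = []
--     for type in offsets: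
--         for start, end in offsets[type]:
--             content = final_string[start:end]
--             result.append((type, content, (start, end)))
--
--     # Return final string and offsets
--     return final_string, result
-- ===== SOURCE B (Python) =====
-- def get_delimiter_offsets(s):
--     # Single pass with per-type open-counters; no per-char set snapshots, no rescans.
--     types = ('<<>>', '{}', '[]')
--     cnt = [0, 0, 0]          # open-delimiter depth per type
--     start = [None, None, None]  # start of the current content range per type
--     ranges = [[], [], []]    # finished (start, end) ranges per type
--     out = []                 # characters of the final string
--     i, n = 0, len(s)
--     while i < n:
--         c = s[i]
--         if c == '<' and s.startswith('<<', i):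
--             cnt[0] += 1; i += 2
--         elif c == '>' and s.startswith('>>', i):
--             cnt[0] -= 1; i += 2
--         elif c == '{':
--             cnt[1] += 1; i += 1
--         elif c == '}':
--             cnt[1] -= 1; i += 1
--         elif c == '[':
--             cnt[2] += 1; i += 1
--         elif c == ']':
--             cnt[2] -= 1; i += 1
--         else:
--             j = len(out)
--             out.append(c)
--             for t in range(3):
--                 if cnt[t] > 0:
--                     if start[t] is None:
--                         start[t] = j
--                 elif start[t] is not None:
--                     ranges[t].append((start[t], j))
--                     start[t] = None
--             i += 1
--     final = ''.join(out)
--     m = len(final)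
--     result = []
--     for t in range(3):
--         if start[t] is not None:
--             ranges[t].append((start[t], m))
--         for a, b in ranges[t]:
--             result.append((types[t], final[a:b], (a, b)))
--     return final, result
-- ===== Notes on version B (the rewrite author's own statement) =====
-- stated objective: faster
-- what changed: Replaces A's per-character set(stack) snapshots plus three full rescans of the stripped string (and a defaultdict regrouping) by a single pass that keeps one open-delimiter counter per type and emits each (start, end) range the moment the counter state changes at an appended character.
import Mathlib
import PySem

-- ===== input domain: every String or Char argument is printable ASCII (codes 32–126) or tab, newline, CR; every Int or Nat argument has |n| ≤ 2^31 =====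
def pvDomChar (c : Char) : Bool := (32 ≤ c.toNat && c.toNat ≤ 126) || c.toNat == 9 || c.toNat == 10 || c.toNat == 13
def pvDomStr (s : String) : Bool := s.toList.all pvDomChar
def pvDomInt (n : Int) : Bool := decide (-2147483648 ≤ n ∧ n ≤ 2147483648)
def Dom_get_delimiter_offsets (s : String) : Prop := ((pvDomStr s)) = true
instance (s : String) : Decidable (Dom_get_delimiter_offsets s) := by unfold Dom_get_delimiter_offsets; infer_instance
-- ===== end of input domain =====

-- B replaces A's per-character set(stack) snapshots and three rescans of the final string by a
-- single pass with per-type open-delimiter counters emitting the ranges directly (objective: faster).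

-- ===== PORT A =====
-- Python's end-of-list stack (append / pop / stack[-1]) is encoded as a head-stack
-- (push / tail / head?) — the same values in reverse order; set(stack) only uses membership.
def pvAscan : List Char → List String → List Char → List (PySem.Set String) →
    Option (List Char × List (PySem.Set String))
  | [], _, fin, cds => some (fin, cds)
  | c :: r, stack, fin, cds =>
    if c = '<' ∧ r.head? = some '<' then pvAscan r.tail ("<<>>" :: stack) fin cds
    else if c = '>' ∧ r.head? = some '>' then
      (if stack.head? = some "<<>>" then pvAscan r.tail stack.tail fin cds
       else none)  -- raise ValueError("Mismatched delimiters", s)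
    else if c = '{' then pvAscan r ("{}" :: stack) fin cds
    else if c = '}' then
      (if stack.head? = some "{}" then pvAscan r stack.tail fin cds else none)
    else if c = '[' then pvAscan r ("[]" :: stack) fin cds
    else if c = ']' then
      (if stack.head? = some "[]" then pvAscan r stack.tail fin cds else none)
    else pvAscan r stack (fin ++ [c]) (cds ++ [PySem.Set.ofList stack])
termination_by l => l.length
decreasing_by all_goals (simp [List.length_tail]; try omega)

-- A's phase-2 scan for one delimiter type (the inner `for j in range(len(final_string))` loop
-- plus the final `if in_range` flush); emits the (start, end) pairs in the order A appends them.
def pvArange (t : String) : List (PySem.Set String) → Int → Bool → Int → List (Int × Int)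
  | [], j, inr, start => if inr then [(start, j)] else []
  | d :: ds, j, inr, start =>
      if t ∈ d then
        if inr then pvArange t ds (j + 1) true start
        else pvArange t ds (j + 1) true j
      else
        if inr then (start, j) :: pvArange t ds (j + 1) false start
        else pvArange t ds (j + 1) false start

-- A's defaultdict `offsets` receives keys exactly in delimiter_types order (a key is created only
-- when a range is appended), so `for type in offsets: for start, end in offsets[type]` is exactly
-- this per-type concatenation in delimiter_types order; empty range lists contribute nothing either way.
def get_delimiter_offsets (s : String) : String × (List (String × String × (Int × Int))) :=
  match pvAscan s.toList [] [] [] with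
  | none => ("", [])  -- unreachable under Pre_: Python raises ValueError here
  | some (fin, cds) =>
      (String.ofList fin,
       (["<<>>", "{}", "[]"]).foldl (fun acc t =>
         acc ++ (pvArange t cds 0 false 0).map
           (fun p => (t, String.ofList (PySem.List.slice fin (some p.1) (some p.2)), p))) [])

-- ===== PORT B =====
-- per-type state (start, ranges): the body of Source B's inner `for t in range(3)` update on a char
def pvBstep (cnt : Int) (st : Option Int × List (Int × Int)) (j : Int) :
    Option Int × List (Int × Int) :=
  if 0 < cnt then
    match st.1 with
    | none => (some j, st.2)
    | some a => (some a, st.2)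
  else
    match st.1 with
    | some a => (none, st.2 ++ [(a, j)])
    | none => (none, st.2)

-- Source B's while loop; the fixed 3-element arrays cnt/start+ranges are unrolled into c0 c1 c2 / s0 s1 s2
def pvBloop : List Char → Int → Int → Int →
    (Option Int × List (Int × Int)) → (Option Int × List (Int × Int)) →
    (Option Int × List (Int × Int)) → List Char →
    List Char × (Option Int × List (Int × Int)) × (Option Int × List (Int × Int)) ×
      (Option Int × List (Int × Int))
  | [], _, _, _, s0, s1, s2, out => (out, s0, s1, s2)
  | c :: r, c0, c1, c2, s0, s1, s2, out =>
    if c = '<' ∧ r.head? = some '<' then pvBloop r.tail (c0 + 1) c1 c2 s0 s1 s2 out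
    else if c = '>' ∧ r.head? = some '>' then pvBloop r.tail (c0 - 1) c1 c2 s0 s1 s2 out
    else if c = '{' then pvBloop r c0 (c1 + 1) c2 s0 s1 s2 out
    else if c = '}' then pvBloop r c0 (c1 - 1) c2 s0 s1 s2 out
    else if c = '[' then pvBloop r c0 c1 (c2 + 1) s0 s1 s2 out
    else if c = ']' then pvBloop r c0 c1 (c2 - 1) s0 s1 s2 out
    else
      pvBloop r c0 c1 c2 (pvBstep c0 s0 out.length) (pvBstep c1 s1 out.length)
        (pvBstep c2 s2 out.length) (out ++ [c])
termination_by l => l.length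
decreasing_by all_goals (simp [List.length_tail]; try omega)

-- flush of a pending open range at end of string (Source B's `if start[t] is not None` after the loop)
def pvBclose (m : Int) (st : Option Int × List (Int × Int)) : List (Int × Int) :=
  match st.1 with
  | some a => st.2 ++ [(a, m)]
  | none => st.2

def get_delimiter_offsets_alt (s : String) : String × (List (String × String × (Int × Int))) :=
  match pvBloop s.toList 0 0 0 (none, []) (none, []) (none, []) [] with
  | (out, s0, s1, s2) =>
      (String.ofList out,
        (pvBclose out.length s0).map
          (fun p => ("<<>>", String.ofList (PySem.List.slice out (some p.1) (some p.2)), p)) ++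
        (pvBclose out.length s1).map
          (fun p => ("{}", String.ofList (PySem.List.slice out (some p.1) (some p.2)), p)) ++
        (pvBclose out.length s2).map
          (fun p => ("[]", String.ofList (PySem.List.slice out (some p.1) (some p.2)), p)))

-- ===== PRECONDITION & SPEC =====
-- Pre_ excludes exactly the inputs on which A raises ValueError("Mismatched delimiters"): a closing
-- delimiter met while the innermost open delimiter is not of its type (or none is open); this
-- matched-closers condition is inherently the standard stack-balancedness check.
def pvOk : List Char → List String → Bool
  | [], _ => true
  | '<' :: '<' :: r, st => pvOk r ("<<>>" :: st)
  | '>' :: '>' :: r, st => if st.head? = some "<<>>" then pvOk r st.tail else false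
  | c :: r, st =>
      if c = '{' then pvOk r ("{}" :: st)
      else if c = '}' then (if st.head? = some "{}" then pvOk r st.tail else false)
      else if c = '[' then pvOk r ("[]" :: st)
      else if c = ']' then (if st.head? = some "[]" then pvOk r st.tail else false)
      else pvOk r st

def Pre_get_delimiter_offsets (s : String) : Prop := pvOk s.toList [] = true
instance (s : String) : Decidable (Pre_get_delimiter_offsets s) := by
  unfold Pre_get_delimiter_offsets; infer_instance

def pvWitness_get_delimiter_offsets : String := "{a}"

def Spec_get_delimiter_offsets (s : String) (out : String × (List (String × String × (Int × Int)))) : Prop := out = get_delimiter_offsets_alt s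
instance (s : String) (out : String × (List (String × String × (Int × Int)))) : Decidable (Spec_get_delimiter_offsets s out) := by unfold Spec_get_delimiter_offsets; infer_instance

-- ===== CLAIM (what is proved, stated in full; the proofs are below) =====
def Claim_equal_get_delimiter_offsets : Prop := ∀ (s : String), Dom_get_delimiter_offsets s → Pre_get_delimiter_offsets s → Spec_get_delimiter_offsets s (get_delimiter_offsets s)

-- ===== LEMMAS AND PROOFS =====

-- unfolding of pvOk on a cons in the same if-chain shape as the ports' tokenizers
lemma pvOk_cons (c : Char) (r : List Char) (st : List String) :
    pvOk (c :: r) st =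
      (if c = '<' ∧ r.head? = some '<' then pvOk r.tail ("<<>>" :: st)
       else if c = '>' ∧ r.head? = some '>' then
         (if st.head? = some "<<>>" then pvOk r.tail st.tail else false)
       else if c = '{' then pvOk r ("{}" :: st)
       else if c = '}' then (if st.head? = some "{}" then pvOk r st.tail else false)
       else if c = '[' then pvOk r ("[]" :: st)
       else if c = ']' then (if st.head? = some "[]" then pvOk r st.tail else false)
       else pvOk r st) := by
  by_cases h1 : c = '<' ∧ r.head? = some '<'
  · obtain ⟨hc, hr⟩ := h1
    subst hc
    cases r with
    | nil => simp at hr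
    | cons d r' =>
        simp only [List.head?_cons, Option.some.injEq] at hr
        subst hr
        simp [pvOk]
  · by_cases h2 : c = '>' ∧ r.head? = some '>'
    · obtain ⟨hc, hr⟩ := h2
      subst hc
      cases r with
      | nil => simp at hr
      | cons d r' =>
          simp only [List.head?_cons, Option.some.injEq] at hr
          subst hr
          simp [pvOk]
    · rw [if_neg h1, if_neg h2]
      cases r with
      | nil => simp [pvOk]
      | cons d r' =>
          by_cases hc : c = '<'
          · subst hc
            have hd : ¬ d = '<' := fun h => h1 ⟨rfl, by simp [h]⟩
            simp [pvOk, hd]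
          · by_cases hg : c = '>'
            · subst hg
              have hd : ¬ d = '>' := fun h => h2 ⟨rfl, by simp [h]⟩
              simp [pvOk, hd]
            · simp [pvOk, hc, hg]

-- reference results of the tokenizing pass: the final characters and the per-character delimiter sets
def pvRefFin : List Char → List String → List Char
  | [], _ => []
  | c :: r, st =>
    if c = '<' ∧ r.head? = some '<' then pvRefFin r.tail ("<<>>" :: st)
    else if c = '>' ∧ r.head? = some '>' then pvRefFin r.tail st.tail
    else if c = '{' then pvRefFin r ("{}" :: st)
    else if c = '}' then pvRefFin r st.tail
    else if c = '[' then pvRefFin r ("[]" :: st)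
    else if c = ']' then pvRefFin r st.tail
    else c :: pvRefFin r st
termination_by l => l.length
decreasing_by all_goals (simp [List.length_tail]; try omega)

def pvRefCds : List Char → List String → List (PySem.Set String)
  | [], _ => []
  | c :: r, st =>
    if c = '<' ∧ r.head? = some '<' then pvRefCds r.tail ("<<>>" :: st)
    else if c = '>' ∧ r.head? = some '>' then pvRefCds r.tail st.tail
    else if c = '{' then pvRefCds r ("{}" :: st)
    else if c = '}' then pvRefCds r st.tail
    else if c = '[' then pvRefCds r ("[]" :: st)
    else if c = ']' then pvRefCds r st.tail
    else PySem.Set.ofList st :: pvRefCds r st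
termination_by l => l.length
decreasing_by all_goals (simp [List.length_tail]; try omega)

-- B's per-type fold over the delimiter-set sequence (membership form of pvBstep)
def pvScanF (t : String) : List (PySem.Set String) → Int → (Option Int × List (Int × Int)) →
    Option Int × List (Int × Int)
  | [], _, st => st
  | d :: ds, j, st =>
      pvScanF t ds (j + 1)
        (if t ∈ d then
          (match st.1 with | none => (some j, st.2) | some a => (some a, st.2))
         else
          (match st.1 with | some a => (none, st.2 ++ [(a, j)]) | none => (none, st.2)))

lemma pvScanF_acc (t : String) (ds : List (PySem.Set String)) :
    ∀ (j : Int) (o : Option Int) (acc : List (Int × Int)),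
      pvScanF t ds j (o, acc) =
        ((pvScanF t ds j (o, [])).1, acc ++ (pvScanF t ds j (o, [])).2) := by
  induction ds with
  | nil => intro j o acc; simp [pvScanF]
  | cons d ds ih =>
      intro j o acc
      by_cases hm : t ∈ d
      · cases o with
        | none => simp only [pvScanF, hm, if_true]; exact ih (j + 1) (some j) acc
        | some a => simp only [pvScanF, hm, if_true]; exact ih (j + 1) (some a) acc
      · cases o with
        | none => simp only [pvScanF, hm, if_false]; exact ih (j + 1) none acc
        | some a =>
            simp only [pvScanF, hm, if_false, List.nil_append]
            rw [ih (j + 1) none (acc ++ [(a, j)]), ih (j + 1) none [(a, j)]]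
            simp

lemma pvBclose_acc (m : Int) (o : Option Int) (acc E : List (Int × Int)) :
    pvBclose m (o, acc ++ E) = acc ++ pvBclose m (o, E) := by
  cases o <;> simp [pvBclose]

lemma pvArange_eq_scan (t : String) (ds : List (PySem.Set String)) :
    ∀ (j start : Int) (inr : Bool),
      pvArange t ds j inr start =
        pvBclose (j + ds.length) (pvScanF t ds j ((if inr then some start else none), [])) := by
  induction ds with
  | nil =>
      intro j start inr
      cases inr <;> simp [pvArange, pvScanF, pvBclose]
  | cons d ds ih =>
      intro j start inr
      have hlen : (j + ((d :: ds).length : Int)) = (j + 1) + (ds.length : Int) := by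
        simp; ring
      by_cases hm : t ∈ d
      · cases inr
        · simp only [pvArange, hm, if_true, Bool.false_eq_true, if_false, pvScanF, hlen]
          rw [ih (j + 1) j true]; simp
        · simp only [pvArange, hm, if_true, pvScanF, hlen]
          rw [ih (j + 1) start true]; simp
      · cases inr
        · simp only [pvArange, hm, if_false, Bool.false_eq_true, pvScanF, hlen]
          rw [ih (j + 1) start false]; simp
        · simp only [pvArange, hm, if_false, if_true, pvScanF, hlen, List.nil_append]
          rw [pvScanF_acc t ds (j + 1) none [(start, j)], pvBclose_acc,
            ih (j + 1) start false]
          simp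

lemma pvRef_len : ∀ (r : List Char) (st : List String),
    (pvRefCds r st).length = (pvRefFin r st).length := by
  intro r st
  induction r, st using pvRefFin.induct with
  | case1 st => simp [pvRefFin, pvRefCds]
  | case2 c r st h ih => simp [pvRefFin, pvRefCds, h, ih]
  | case3 c r st h1 h2 ih => simp [pvRefFin, pvRefCds, h2, ih]
  | case4 r st h1 h2 ih => simp [pvRefFin, pvRefCds, ih]
  | case5 r st h1 h2 h3 ih => simp [pvRefFin, pvRefCds, h3, ih]
  | case6 r st h1 h2 h3 h4 ih => simp [pvRefFin, pvRefCds, h3, h4, ih]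
  | case7 r st h1 h2 h3 h4 h5 ih => simp [pvRefFin, pvRefCds, h3, h4, h5, ih]
  | case8 c r st h1 h2 h3 h4 h5 h6 ih => simp [pvRefFin, pvRefCds, h1, h2, h3, h4, h5, h6, ih]

lemma count_pos_iff_mem_ofList (t : String) (st : List String) :
    (0 < ((st.count t : Nat) : Int)) ↔ t ∈ PySem.Set.ofList st := by
  rw [PySem.Set.mem_ofList]
  exact_mod_cast List.count_pos_iff

lemma pvBstep_mem (t : String) (st : List String) (s : Option Int × List (Int × Int)) (j : Int) :
    pvBstep ((st.count t : Nat) : Int) s j =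
      (if t ∈ PySem.Set.ofList st then
        (match s.1 with | none => (some j, s.2) | some a => (some a, s.2))
       else
        (match s.1 with | some a => (none, s.2 ++ [(a, j)]) | none => (none, s.2))) := by
  by_cases hm : t ∈ PySem.Set.ofList st
  · have h : (0 : Int) < ((st.count t : Nat) : Int) := (count_pos_iff_mem_ofList t st).2 hm
    simp only [pvBstep, if_pos h, hm, if_true]
  · have h : ¬ (0 : Int) < ((st.count t : Nat) : Int) :=
      fun h => hm ((count_pos_iff_mem_ofList t st).1 h)
    simp only [pvBstep, if_neg h, hm, if_false]

lemma pvAscan_ok : ∀ (r : List Char) (st : List String), pvOk r st = true →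
    ∀ (fin : List Char) (cds : List (PySem.Set String)),
      pvAscan r st fin cds = some (fin ++ pvRefFin r st, cds ++ pvRefCds r st) := by
  intro r st
  induction r, st using pvRefFin.induct with
  | case1 st => intro _ fin cds; simp [pvAscan, pvRefFin, pvRefCds]
  | case2 c r st h ih =>
      intro hok fin cds
      simp [pvOk_cons, h] at hok
      simp [pvAscan, pvRefFin, pvRefCds, h, ih hok]
  | case3 c r st h1 h2 ih =>
      intro hok fin cds
      simp [pvOk_cons, h2] at hok
      cases st with
      | nil => simp at hok
      | cons a st' =>
          by_cases ha : a = "<<>>"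
          · subst ha
            simp only [List.tail_cons] at ih
            simp at hok
            simp [pvAscan, pvRefFin, pvRefCds, h2, ih hok]
          · simp [ha] at hok
  | case4 r st h1 h2 ih =>
      intro hok fin cds
      simp [pvOk_cons] at hok
      simp [pvAscan, pvRefFin, pvRefCds, ih hok]
  | case5 r st h1 h2 h3 ih =>
      intro hok fin cds
      simp [pvOk_cons, h3] at hok
      cases st with
      | nil => simp at hok
      | cons a st' =>
          by_cases ha : a = "{}"
          · subst ha
            simp only [List.tail_cons] at ih
            simp at hok
            simp [pvAscan, pvRefFin, pvRefCds, h3, ih hok]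
          · simp [ha] at hok
  | case6 r st h1 h2 h3 h4 ih =>
      intro hok fin cds
      simp [pvOk_cons, h3, h4] at hok
      simp [pvAscan, pvRefFin, pvRefCds, h3, h4, ih hok]
  | case7 r st h1 h2 h3 h4 h5 ih =>
      intro hok fin cds
      simp [pvOk_cons, h3, h4, h5] at hok
      cases st with
      | nil => simp at hok
      | cons a st' =>
          by_cases ha : a = "[]"
          · subst ha
            simp only [List.tail_cons] at ih
            simp at hok
            simp [pvAscan, pvRefFin, pvRefCds, h3, h4, h5, ih hok]
          · simp [ha] at hok
  | case8 c r st h1 h2 h3 h4 h5 h6 ih =>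
      intro hok fin cds
      simp [pvOk_cons, h1, h2, h3, h4, h5, h6] at hok
      simp [pvAscan, pvRefFin, pvRefCds, h1, h2, h3, h4, h5, h6, ih hok]

lemma count_cast_cons_self (t : String) (st : List String) :
    ((st.count t : Nat) : Int) + 1 = (((t :: st).count t : Nat) : Int) := by
  simp [List.count_cons_self]

lemma count_cast_cons_ne (t u : String) (st : List String) (h : u ≠ t) :
    ((st.count t : Nat) : Int) = (((u :: st).count t : Nat) : Int) := by
  simp [List.count_cons_of_ne h]

lemma count_cast_cons_self_sub (t : String) (st : List String) :
    (((t :: st).count t : Nat) : Int) - 1 = ((st.count t : Nat) : Int) := by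
  simp [List.count_cons_self]

lemma pvBloop_eq : ∀ (r : List Char) (st : List String), pvOk r st = true →
    ∀ (s0 s1 s2 : Option Int × List (Int × Int)) (out : List Char),
      pvBloop r ((st.count "<<>>" : Nat) : Int) ((st.count "{}" : Nat) : Int)
          ((st.count "[]" : Nat) : Int) s0 s1 s2 out =
        (out ++ pvRefFin r st,
         pvScanF "<<>>" (pvRefCds r st) out.length s0,
         pvScanF "{}" (pvRefCds r st) out.length s1,
         pvScanF "[]" (pvRefCds r st) out.length s2) := by
  intro r st
  induction r, st using pvRefFin.induct with
  | case1 st => intro _ s0 s1 s2 out; simp [pvBloop, pvRefFin, pvRefCds, pvScanF]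
  | case2 c r st h ih =>
      intro hok s0 s1 s2 out
      simp [pvOk_cons, h] at hok
      simp only [pvBloop, pvRefFin, pvRefCds, h, and_self, if_true]
      rw [count_cast_cons_self "<<>>" st, count_cast_cons_ne "{}" "<<>>" st (by decide),
        count_cast_cons_ne "[]" "<<>>" st (by decide)]
      exact ih hok s0 s1 s2 out
  | case3 c r st h1 h2 ih =>
      intro hok s0 s1 s2 out
      simp [pvOk_cons, h2] at hok
      cases st with
      | nil => simp at hok
      | cons a st' =>
          by_cases ha : a = "<<>>"
          · subst ha
            simp only [List.tail_cons] at ih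
            simp at hok
            simp only [pvBloop, pvRefFin, pvRefCds, h2, and_self, if_true,
              List.tail_cons]
            rw [count_cast_cons_self_sub "<<>>" st',
              ← count_cast_cons_ne "{}" "<<>>" st' (by decide),
              ← count_cast_cons_ne "[]" "<<>>" st' (by decide)]
            exact ih hok s0 s1 s2 out
          · simp [ha] at hok
  | case4 r st h1 h2 ih =>
      intro hok s0 s1 s2 out
      simp [pvOk_cons] at hok
      simp only [pvBloop, pvRefFin, pvRefCds, if_neg h1, if_neg h2,
        if_true]
      rw [count_cast_cons_self "{}" st, count_cast_cons_ne "<<>>" "{}" st (by decide),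
        count_cast_cons_ne "[]" "{}" st (by decide)]
      exact ih hok s0 s1 s2 out
  | case5 r st h1 h2 h3 ih =>
      intro hok s0 s1 s2 out
      simp [pvOk_cons, h3] at hok
      cases st with
      | nil => simp at hok
      | cons a st' =>
          by_cases ha : a = "{}"
          · subst ha
            simp only [List.tail_cons] at ih
            simp at hok
            simp only [pvBloop, pvRefFin, pvRefCds, if_neg h1, if_neg h2, if_neg h3,
              if_true, List.tail_cons]
            rw [count_cast_cons_self_sub "{}" st',
              ← count_cast_cons_ne "<<>>" "{}" st' (by decide),
              ← count_cast_cons_ne "[]" "{}" st' (by decide)]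
            exact ih hok s0 s1 s2 out
          · simp [ha] at hok
  | case6 r st h1 h2 h3 h4 ih =>
      intro hok s0 s1 s2 out
      simp [pvOk_cons, h3, h4] at hok
      simp only [pvBloop, pvRefFin, pvRefCds, if_neg h1, if_neg h2, if_neg h3, if_neg h4,
        if_true]
      rw [count_cast_cons_self "[]" st, count_cast_cons_ne "<<>>" "[]" st (by decide),
        count_cast_cons_ne "{}" "[]" st (by decide)]
      exact ih hok s0 s1 s2 out
  | case7 r st h1 h2 h3 h4 h5 ih =>
      intro hok s0 s1 s2 out
      simp [pvOk_cons, h3, h4, h5] at hok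
      cases st with
      | nil => simp at hok
      | cons a st' =>
          by_cases ha : a = "[]"
          · subst ha
            simp only [List.tail_cons] at ih
            simp at hok
            simp only [pvBloop, pvRefFin, pvRefCds, if_neg h1, if_neg h2, if_neg h3,
              if_neg h4, if_neg h5, if_true, List.tail_cons]
            rw [count_cast_cons_self_sub "[]" st',
              ← count_cast_cons_ne "<<>>" "[]" st' (by decide),
              ← count_cast_cons_ne "{}" "[]" st' (by decide)]
            exact ih hok s0 s1 s2 out
          · simp [ha] at hok
  | case8 c r st h1 h2 h3 h4 h5 h6 ih =>
      intro hok s0 s1 s2 out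
      simp [pvOk_cons, h1, h2, h3, h4, h5, h6] at hok
      simp only [pvBloop, pvRefFin, pvRefCds, if_neg h1, if_neg h2, if_neg h3, if_neg h4,
        if_neg h5, if_neg h6]
      rw [pvBstep_mem "<<>>" st s0 out.length, pvBstep_mem "{}" st s1 out.length,
        pvBstep_mem "[]" st s2 out.length]
      rw [ih hok _ _ _ (out ++ [c])]
      simp only [pvScanF]
      have hl : (((out ++ [c]).length : Nat) : Int) = ((out.length : Nat) : Int) + 1 := by
        simp [List.length_append]
      rw [hl]
      simp [List.append_assoc]

theorem get_delimiter_offsets_spec : Claim_equal_get_delimiter_offsets := by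
  unfold Claim_equal_get_delimiter_offsets
  intro s _ hpre
  unfold Spec_get_delimiter_offsets
  have hA := pvAscan_ok s.toList [] hpre [] []
  have hB := pvBloop_eq s.toList [] hpre (none, []) (none, []) (none, []) []
  simp only [List.count_nil, Nat.cast_zero, List.nil_append, List.length_nil] at hA hB
  simp only [get_delimiter_offsets, get_delimiter_offsets_alt, hA, hB]
  simp only [List.foldl_cons, List.foldl_nil, List.nil_append]
  rw [pvArange_eq_scan "<<>>" (pvRefCds s.toList []) 0 0 false,
    pvArange_eq_scan "{}" (pvRefCds s.toList []) 0 0 false,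
    pvArange_eq_scan "[]" (pvRefCds s.toList []) 0 0 false,
    pvRef_len s.toList []]
  simp [List.append_assoc]
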